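-- pv_equiv track=rewrite | github.com/francod2004/unify-crm | enrichment_agent.py | _is_placeholder_email
-- ===== SOURCE A (Python) =====
-- PLACEHOLDER_EMAILS = {
--     # Wix / Squarespace / template defaults seen in the wild
--     "example@mysite.com", "example@example.com",
--     "email@email.com", "email@website.com",
--     "test@test.com", "test@example.com",
--     "admin@admin.com",
--     # "Your..." placeholder fields in contact-form templates
--     "your@email.com", "your.email@email.com",
--     "contact@yoursite.com", "info@yoursite.com",
--     "contact@yourdomain.com", "hello@yourdomain.com",
--     # Generic form placeholders
--     "user@domain.com", "name@domain.com", "name@example.com",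
--     "firstname@lastname.com", "first.last@company.com",
-- }
--
-- PLACEHOLDER_DOMAINS = {
--     # RFC 2606 reserved test domains
--     "example.com", "example.org", "example.net",
--     # Common placeholder domains on Wix / Squarespace / template sites
--     "yourdomain.com", "yoursite.com", "yourcompany.com", "yourbusiness.com",
--     "mysite.com",
-- }
--
-- PLACEHOLDER_LOCAL_PREFIXES = {
--     "example", "your.email", "firstname.lastname", "test",
-- }
--
-- def _is_placeholder_email(email):
--     """Return True if this looks like a template/placeholder email that
--     should never be written to a prospect record."""
--     e = (email or "").strip().lower()
--     if not e or "@" not in e: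
--         return False
--     if e in PLACEHOLDER_EMAILS:
--         return True
--     local, _, domain = e.partition("@")
--     if domain in PLACEHOLDER_DOMAINS:
--         return True
--     if any(domain.endswith("." + d) for d in PLACEHOLDER_DOMAINS):
--         return True
--     if local in PLACEHOLDER_LOCAL_PREFIXES:
--         return True
--     return False
-- ===== SOURCE B (Python) =====
-- PLACEHOLDER_EMAILS = {
--     "example@mysite.com", "example@example.com",
--     "email@email.com", "email@website.com",
--     "test@test.com", "test@example.com",
--     "admin@admin.com",
--     "your@email.com", "your.email@email.com",
--     "contact@yoursite.com", "info@yoursite.com",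
--     "contact@yourdomain.com", "hello@yourdomain.com",
--     "user@domain.com", "name@domain.com", "name@example.com",
--     "firstname@lastname.com", "first.last@company.com",
-- }
--
-- PLACEHOLDER_DOMAINS = {
--     "example.com", "example.org", "example.net",
--     "yourdomain.com", "yoursite.com", "yourcompany.com", "yourbusiness.com",
--     "mysite.com",
-- }
--
-- PLACEHOLDER_LOCAL_PREFIXES = {
--     "example", "your.email", "firstname.lastname", "test",
-- }
--
--
-- def _is_placeholder_email(email):
--     """Return True if this looks like a template/placeholder email that
--     should never be written to a prospect record."""
--     e = (email or "").strip().lower()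
--     if "@" not in e:
--         return False
--     if e in PLACEHOLDER_EMAILS:
--         return True
--     local, domain = e.split("@", 1)
--     if local in PLACEHOLDER_LOCAL_PREFIXES:
--         return True
--     # walk the domain's own dot-boundary suffixes instead of scanning the
--     # placeholder set with endswith: covers exact match (i == 0) and subdomains
--     labels = domain.split(".")
--     return any(".".join(labels[i:]) in PLACEHOLDER_DOMAINS
--                for i in range(len(labels)))
-- ===== Notes on version B (the rewrite author's own statement) =====
-- stated objective: alternative
-- what changed: A's two separate domain tests (exact set membership plus an any(endswith '.'+d) scan over the placeholder set) are replaced by one scan over the candidate domain's own dot-boundary suffixes: split the domain on '.', rejoin each tail labels[i:] and look it up in the set, which subsumes both the exact-match (i=0) and subdomain cases; the local-prefix test is hoisted before it.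
import Mathlib
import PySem

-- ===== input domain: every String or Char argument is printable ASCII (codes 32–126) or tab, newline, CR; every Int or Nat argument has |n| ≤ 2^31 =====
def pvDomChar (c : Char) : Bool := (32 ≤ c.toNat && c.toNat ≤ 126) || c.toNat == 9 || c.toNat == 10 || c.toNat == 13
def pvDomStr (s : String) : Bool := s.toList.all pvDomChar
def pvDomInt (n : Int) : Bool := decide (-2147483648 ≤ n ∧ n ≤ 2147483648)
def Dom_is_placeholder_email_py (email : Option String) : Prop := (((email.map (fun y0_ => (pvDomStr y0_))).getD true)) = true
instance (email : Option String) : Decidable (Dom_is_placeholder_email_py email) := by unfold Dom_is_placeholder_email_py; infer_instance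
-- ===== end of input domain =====

-- B replaces A's two domain tests (exact set membership plus an any(endswith)
-- scan over the placeholder set) with one scan over the domain's own
-- dot-boundary suffixes (split on '.', rejoin each tail); alternative
-- structure, same values everywhere.

-- Module constants shared by both Pythons
def pvPlaceholderEmails : List (List Char) :=
  ["example@mysite.com".toList, "example@example.com".toList,
   "email@email.com".toList, "email@website.com".toList,
   "test@test.com".toList, "test@example.com".toList,
   "admin@admin.com".toList,
   "your@email.com".toList, "your.email@email.com".toList,
   "contact@yoursite.com".toList, "info@yoursite.com".toList,
   "contact@yourdomain.com".toList, "hello@yourdomain.com".toList,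
   "user@domain.com".toList, "name@domain.com".toList, "name@example.com".toList,
   "firstname@lastname.com".toList, "first.last@company.com".toList]

def pvPlaceholderDomains : List (List Char) :=
  ["example.com".toList, "example.org".toList, "example.net".toList,
   "yourdomain.com".toList, "yoursite.com".toList, "yourcompany.com".toList,
   "yourbusiness.com".toList, "mysite.com".toList]

def pvPlaceholderLocals : List (List Char) :=
  ["example".toList, "your.email".toList, "firstname.lastname".toList, "test".toList]

-- e = (email or "").strip().lower() — identical first line of both Pythons
def pvNorm (email : Option String) : List Char :=
  PySem.Chars.lower (PySem.Chars.strip ((email.getD "").toList))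

-- s.partition(sep) for a one-char separator, exact: (before, sep-if-found, after);
-- hand-ported for A (PySem has no partition primitive).
def pvPartition : List Char → Char → List Char × List Char × List Char
  | [], _ => ([], [], [])
  | c :: rest, sep =>
    if c = sep then ([], [sep], rest)
    else
      let r := pvPartition rest sep
      (c :: r.1, r.2.1, r.2.2)

-- ===== PORT A =====
def is_placeholder_email_py (email : Option String) : Bool :=
  if pvNorm email = [] || !(PySem.Chars.isIn ['@'] (pvNorm email)) then false
  else if pvPlaceholderEmails.contains (pvNorm email) then true
  else if pvPlaceholderDomains.contains (pvPartition (pvNorm email) '@').2.2 then true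
  else if pvPlaceholderDomains.any
      (fun d => PySem.Chars.endswith (pvPartition (pvNorm email) '@').2.2 ('.' :: d)) then true
  else if pvPlaceholderLocals.contains (pvPartition (pvNorm email) '@').1 then true
  else false

-- ===== PORT B =====
-- hand port of domain.split(".") (exact: "".split(".") = [""], trailing dot keeps "")
def pvSplitDots (s : List Char) : List (List Char) :=
  if h : s.dropWhile (· ≠ '.') = [] then [s.takeWhile (· ≠ '.')]
  else s.takeWhile (· ≠ '.') :: pvSplitDots ((s.dropWhile (· ≠ '.')).tail)
termination_by s.length
decreasing_by
  have hle := List.length_dropWhile_le (· ≠ '.') s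
  have : 0 < (s.dropWhile (· ≠ '.')).length := List.length_pos_iff.mpr h
  simp only [List.length_tail]
  omega

-- hand port of ".".join(parts)
def pvJoinDots : List (List Char) → List Char
  | [] => []
  | [x] => x
  | x :: y :: rest => x ++ '.' :: pvJoinDots (y :: rest)

def is_placeholder_email_py_alt (email : Option String) : Bool :=
  let e := pvNorm email
  if !(PySem.Chars.isIn ['@'] e) then false
  else if pvPlaceholderEmails.contains e then true
  else
    -- local, domain = e.split("@", 1): split at the first '@'
    let loc := e.takeWhile (· ≠ '@')
    let dom := (e.dropWhile (· ≠ '@')).tail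
    if pvPlaceholderLocals.contains loc then true
    else
      let labels := pvSplitDots dom
      (List.range labels.length).any fun i =>
        pvPlaceholderDomains.contains (pvJoinDots (labels.drop i))

-- ===== PRECONDITION & SPEC =====
def Spec_is_placeholder_email_py (email : Option String) (out : Bool) : Prop := out = is_placeholder_email_py_alt email
instance (email : Option String) (out : Bool) : Decidable (Spec_is_placeholder_email_py email out) := by unfold Spec_is_placeholder_email_py; infer_instance

-- ===== CLAIM (what is proved, stated in full; the proofs are below) =====
def Claim_equal_is_placeholder_email_py : Prop := ∀ (email : Option String), Dom_is_placeholder_email_py email → Spec_is_placeholder_email_py email (is_placeholder_email_py email)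

-- ===== LEMMAS AND PROOFS =====

-- what survives a dropWhile (· ≠ '.') is nothing or a '.'-headed list
theorem dropWhile_dot (s : List Char) : s.dropWhile (· ≠ '.') = [] ∨
    s.dropWhile (· ≠ '.') = '.' :: (s.dropWhile (· ≠ '.')).tail := by
  induction s with
  | nil => left; rfl
  | cons c rest ih =>
    by_cases hc : c = '.'
    · right; simp [hc]
    · simpa [List.dropWhile_cons, hc] using ih

theorem takeWhile_no_dot (s : List Char) : '.' ∉ s.takeWhile (· ≠ '.') := by
  intro hm
  have := List.mem_takeWhile_imp hm
  simp at this

theorem split_glue (s : List Char) (h : s.dropWhile (· ≠ '.') ≠ []) :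
    s.takeWhile (· ≠ '.') ++ '.' :: (s.dropWhile (· ≠ '.')).tail = s := by
  rcases dropWhile_dot s with hd | hd
  · exact absurd hd h
  · conv_rhs => rw [← List.takeWhile_append_dropWhile (p := (· ≠ '.')) (l := s)]
    rw [hd]
    simp

theorem pvSplitDots_ne_nil (s : List Char) : pvSplitDots s ≠ [] := by
  rw [pvSplitDots]
  split <;> simp

theorem pvJoinDots_cons (x : List Char) (L : List (List Char)) (h : L ≠ []) :
    pvJoinDots (x :: L) = x ++ '.' :: pvJoinDots L := by
  cases L with
  | nil => exact absurd rfl h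
  | cons y r => rfl

theorem pvJoinDots_splitDots (s : List Char) : pvJoinDots (pvSplitDots s) = s := by
  induction s using pvSplitDots.induct with
  | case1 s h =>
    rw [pvSplitDots, dif_pos h]
    have := List.takeWhile_append_dropWhile (p := (· ≠ '.')) (l := s)
    rw [h, List.append_nil] at this
    simpa [pvJoinDots] using this
  | case2 s h ih =>
    rw [pvSplitDots, dif_neg h, pvJoinDots_cons _ _ (pvSplitDots_ne_nil _), ih]
    exact split_glue s h

theorem pvPartition_fst (s : List Char) (sep : Char) :
    (pvPartition s sep).1 = s.takeWhile (· ≠ sep) := by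
  induction s with
  | nil => simp [pvPartition]
  | cons c rest ih =>
    by_cases hc : c = sep
    · simp [pvPartition, hc]
    · simp [pvPartition, hc, ih]

theorem pvPartition_snd (s : List Char) (sep : Char) :
    (pvPartition s sep).2.2 = (s.dropWhile (· ≠ sep)).tail := by
  induction s with
  | nil => simp [pvPartition]
  | cons c rest ih =>
    by_cases hc : c = sep
    · simp [pvPartition, hc]
    · simp [pvPartition, hc, ih]

-- dot-boundary suffixes: '.'++d is a suffix of u ++ '.'::t (with no '.' in u)
-- exactly when d = t or '.'++d is a suffix of t
theorem dot_suffix_iff (u t d : List Char) (hu : '.' ∉ u) :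
    ('.' :: d <:+ u ++ '.' :: t) ↔ (d = t ∨ '.' :: d <:+ t) := by
  induction u with
  | nil =>
    rw [List.nil_append, List.suffix_cons_iff]
    constructor
    · rintro (h | h)
      · exact Or.inl (List.cons_eq_cons.mp h).2
      · exact Or.inr h
    · rintro (rfl | h)
      · exact Or.inl rfl
      · exact Or.inr h
  | cons a u' ih =>
    simp only [List.mem_cons, not_or] at hu
    rw [List.cons_append, List.suffix_cons_iff]
    constructor
    · rintro (h | h)
      · exfalso; exact hu.1 (List.cons_eq_cons.mp h).1
      · exact (ih hu.2).mp h
    · intro h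
      exact Or.inr ((ih hu.2).mpr h)

-- peeling one label off the endswith scan
theorem any_endswith_step (u t : List Char) (hu : '.' ∉ u) (L : List (List Char)) :
    (L.any fun d => PySem.Chars.endswith (u ++ '.' :: t) ('.' :: d))
      = (L.contains t || L.any fun d => PySem.Chars.endswith t ('.' :: d)) := by
  induction L with
  | nil => rfl
  | cons a L ihL =>
    have key : PySem.Chars.endswith (u ++ '.' :: t) ('.' :: a)
        = ((a == t) || PySem.Chars.endswith t ('.' :: a)) := by
      rw [Bool.eq_iff_iff]
      simp only [PySem.Chars.endswith, List.isSuffixOf_iff_suffix, Bool.or_eq_true, beq_iff_eq]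
      exact dot_suffix_iff u t a hu
    rw [Bool.eq_iff_iff]
    simp only [List.any_cons, List.contains_cons, ihL, key, Bool.or_eq_true, beq_iff_eq]
    constructor <;> rintro ((h1 | h1) | h2 | h3) <;>
      first
      | exact Or.inl (Or.inl h1.symm)
      | exact Or.inr (Or.inl h1)
      | exact Or.inl (Or.inr h2)
      | exact Or.inl (Or.inr (Or.inl h2))
      | exact Or.inr (Or.inr h3)

-- B's suffix scan computes A's two domain tests combined
theorem rangeAny_eq (s : List Char) :
    ((List.range (pvSplitDots s).length).any fun i =>
        pvPlaceholderDomains.contains (pvJoinDots ((pvSplitDots s).drop i)))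
      = (pvPlaceholderDomains.contains s ||
         pvPlaceholderDomains.any fun d => PySem.Chars.endswith s ('.' :: d)) := by
  induction s using pvSplitDots.induct with
  | case1 s h =>
    -- no '.' in s: one label, and no '.'-suffix can match
    have hs : s.takeWhile (· ≠ '.') = s := by
      have := List.takeWhile_append_dropWhile (p := (· ≠ '.')) (l := s)
      rwa [h, List.append_nil] at this
    have hnodot : '.' ∉ s := by
      intro hm
      have := List.dropWhile_eq_nil_iff.mp h '.' hm
      simp at this
    have hany : (pvPlaceholderDomains.any fun d =>
        PySem.Chars.endswith s ('.' :: d)) = false := by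
      rw [List.any_eq_false]
      intro d _
      simp only [PySem.Chars.endswith, List.isSuffixOf_iff_suffix]
      intro hsuf
      exact hnodot (hsuf.subset (List.mem_cons_self))
    rw [pvSplitDots, dif_pos h, hs, hany]
    simp [pvJoinDots, List.range_succ]
  | case2 s h ih =>
    have hu := takeWhile_no_dot s
    have hsplit := split_glue s h
    have hEnd := any_endswith_step (s.takeWhile (· ≠ '.'))
      ((s.dropWhile (· ≠ '.')).tail) hu pvPlaceholderDomains
    rw [hsplit] at hEnd
    rw [pvSplitDots, dif_neg h, hEnd]
    rw [List.length_cons, List.range_succ_eq_map, List.any_cons, List.any_map]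
    have hdrop0 : pvJoinDots ((s.takeWhile (· ≠ '.') ::
        pvSplitDots ((s.dropWhile (· ≠ '.')).tail)).drop 0) = s := by
      rw [List.drop_zero, pvJoinDots_cons _ _ (pvSplitDots_ne_nil _),
        pvJoinDots_splitDots, hsplit]
    rw [hdrop0]
    simp only [Function.comp_def, List.drop_succ_cons]
    rw [ih]

-- ===== VERDICT (by name: the statement is the Claim_ definition above) =====
theorem is_placeholder_email_py_spec : Claim_equal_is_placeholder_email_py := by
  intro email _
  unfold Spec_is_placeholder_email_py is_placeholder_email_py is_placeholder_email_py_alt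
  generalize pvNorm email = e
  by_cases he : e = []
  · subst he; decide
  · simp only [he, decide_false, Bool.false_or]
    cases hin : PySem.Chars.isIn ['@'] e with
    | false => simp
    | true =>
      simp only [Bool.not_true, Bool.false_eq_true, if_false]
      cases hm : pvPlaceholderEmails.contains e with
      | true => simp
      | false =>
        simp only [Bool.false_eq_true, if_false]
        rw [pvPartition_fst, pvPartition_snd, rangeAny_eq]
        cases pvPlaceholderDomains.contains ((e.dropWhile (· ≠ '@')).tail) <;>
          cases (pvPlaceholderDomains.any fun d =>
            PySem.Chars.endswith ((e.dropWhile (· ≠ '@')).tail) ('.' :: d)) <;>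
          cases pvPlaceholderLocals.contains (e.takeWhile (· ≠ '@')) <;> rfl
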